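-- pv_equiv track=rewrite | github.com/rahimegedik/Mini-Python-Project | python/stutter.py | stutter
-- ===== SOURCE A (Python) =====
-- def stutter(a):
--
--     c=len(a)
--     for item in range(len(a)):
--         a.append(a[item])
--         a.append(a[item])
--     for i in range(c):
--         del a[0]
--
--     return a
-- ===== SOURCE B (Python) =====
-- def stutter(a):
--     i = 0
--     while i < len(a):
--         a.insert(i, a[i])
--         i += 2
--     return a
-- ===== Notes on version B (the rewrite author's own statement) =====
-- stated objective: faster
-- what changed: Replaces A's two-loop pattern (append every element twice at the end, then delete the first n elements one by one) with a single index-driven in-place insertion loop that inserts a copy of each element just before it, advancing by two.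
import Mathlib
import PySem

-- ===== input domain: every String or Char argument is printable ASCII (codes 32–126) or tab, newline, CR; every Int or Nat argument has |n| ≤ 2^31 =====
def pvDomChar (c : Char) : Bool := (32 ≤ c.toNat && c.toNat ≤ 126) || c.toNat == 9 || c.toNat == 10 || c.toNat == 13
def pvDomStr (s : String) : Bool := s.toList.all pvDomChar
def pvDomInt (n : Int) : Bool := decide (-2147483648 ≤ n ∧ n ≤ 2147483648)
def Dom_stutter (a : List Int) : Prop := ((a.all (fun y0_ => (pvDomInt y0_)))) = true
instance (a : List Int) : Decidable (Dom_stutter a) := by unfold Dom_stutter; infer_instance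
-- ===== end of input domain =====

-- B replaces A's append-all-then-delete-prefix two-loop pattern with one in-place
-- insertion loop (objective: simpler). Both Pythons mutate `a` in place to the same
-- final contents; the theorems are about the returned value.

-- ===== PORT A =====
-- for item in range(len(a)): a.append(a[item]); a.append(a[item])
-- (a[item] is always in range since item < original len ≤ current len, so pyGetD is exact here)
-- then: for i in range(c): del a[0]   (the list is never empty there, so eraseIdx 0 is exact)
def stutter (a : List Int) : List Int :=
  let c : Nat := a.length
  let a1 := (PySem.List.pyRange 0 (a.length : Int) 1).foldl
    (fun acc item =>
      let acc2 := acc ++ [PySem.List.pyGetD acc item 0]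
      acc2 ++ [PySem.List.pyGetD acc2 item 0]) a
  (PySem.List.pyRange 0 (c : Int) 1).foldl (fun acc _ => acc.eraseIdx 0) a1

-- ===== PORT B =====
-- while i < len(a): a.insert(i, a[i]); i += 2   (a[i] in range under the guard, so pyGetD is exact)
def stutterAltGo (a : List Int) (i : Nat) : List Int :=
  if h : i < a.length then
    stutterAltGo (PySem.List.insert a (i : Int) (PySem.List.pyGetD a (i : Int) 0)) (i + 2)
  else a
termination_by a.length - i
decreasing_by
  simp only [PySem.List.length_insert]
  omega

def stutter_alt (a : List Int) : List Int := stutterAltGo a 0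

-- ===== PRECONDITION & SPEC =====
def Spec_stutter (a : List Int) (out : List Int) : Prop := out = stutter_alt a
instance (a : List Int) (out : List Int) : Decidable (Spec_stutter a out) := by unfold Spec_stutter; infer_instance

-- ===== CLAIM (what is proved, stated in full; the proofs are below) =====
def Claim_equal_stutter : Prop := ∀ (a : List Int), Dom_stutter a → Spec_stutter a (stutter a)

-- ===== LEMMAS AND PROOFS =====

-- the common value of both programs: each element doubled
def dup (xs : List Int) : List Int := xs.flatMap (fun x => [x, x])

theorem dup_append (xs ys : List Int) : dup (xs ++ ys) = dup xs ++ dup ys :=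
  List.flatMap_append
theorem dup_length (xs : List Int) : (dup xs).length = 2 * xs.length := by
  induction xs with
  | nil => rfl
  | cons x xs ih => simp [dup] at ih ⊢; omega

-- A's first loop: after k steps the list is a ++ dup (a.take k)
theorem stutterA_loop1 (a : List Int) (k : Nat) (hk : k ≤ a.length) :
    (PySem.List.pyRange 0 (k : Int) 1).foldl
      (fun acc item =>
        let acc2 := acc ++ [PySem.List.pyGetD acc item 0]
        acc2 ++ [PySem.List.pyGetD acc2 item 0]) a
    = a ++ dup (a.take k) := by
  induction k with
  | zero => simp [dup]
  | succ k ih =>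
    rw [show ((k + 1 : Nat) : Int) = (k : Int) + 1 by push_cast; ring,
        PySem.List.pyRange_one_succ_right (by positivity), List.foldl_append,
        ih (by omega)]
    have hk' : k < a.length := by omega
    have hget : PySem.List.pyGetD (a ++ dup (a.take k)) (k : Int) 0 = a[k] := by
      rw [PySem.List.pyGetD_natCast, List.getD_eq_getElem?_getD,
          List.getElem?_append_left (by omega), List.getElem?_eq_getElem hk']
      rfl
    have hget2 : PySem.List.pyGetD ((a ++ dup (a.take k)) ++ [a[k]]) (k : Int) 0 = a[k] := by
      rw [PySem.List.pyGetD_natCast, List.getD_eq_getElem?_getD,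
          List.getElem?_append_left (by simp; omega),
          List.getElem?_append_left (by omega), List.getElem?_eq_getElem hk']
      rfl
    simp only [List.foldl_cons, List.foldl_nil, hget, hget2]
    have htake : List.take (k + 1) a = List.take k a ++ [a[k]] := by
      rw [List.take_add_one, List.getElem?_eq_getElem hk']; rfl
    rw [htake, dup_append]
    simp [dup]
  
-- A's second loop: c leading deletions = drop c
theorem stutterA_loop2 (c : Nat) (L : List Int) :
    (PySem.List.pyRange 0 (c : Int) 1).foldl (fun acc _ => acc.eraseIdx 0) L = L.drop c := by
  induction c generalizing L with
  | zero => simp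
  | succ c ih =>
    rw [show ((c + 1 : Nat) : Int) = (c : Int) + 1 by push_cast; ring,
        PySem.List.pyRange_one_succ_right (by positivity), List.foldl_append, ih]
    simp only [List.foldl_cons, List.foldl_nil, List.eraseIdx_zero, List.tail_drop]

theorem stutterA_eq_dup (a : List Int) : stutter a = dup a := by
  unfold stutter
  rw [stutterA_loop1 a a.length le_rfl, List.take_length, stutterA_loop2,
      List.drop_left]

-- B's loop invariant: with the first part already doubled, the loop doubles the rest
theorem stutterB_go (rest pre : List Int) :
    stutterAltGo (dup pre ++ rest) (2 * pre.length) = dup pre ++ dup rest := by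
  induction rest generalizing pre with
  | nil =>
    rw [List.append_nil, stutterAltGo, dif_neg (by rw [dup_length]; omega)]
    simp [dup]
  | cons x xs ih =>
    rw [stutterAltGo]
    have hlen : (dup pre).length = 2 * pre.length := dup_length pre
    have hlt : 2 * pre.length < (dup pre ++ x :: xs).length := by simp [hlen]
    simp only [dif_pos hlt]
    have hget : PySem.List.pyGetD (dup pre ++ x :: xs) ((2 * pre.length : Nat) : Int) 0 = x := by
      rw [PySem.List.pyGetD_natCast, List.getD_eq_getElem?_getD, ← hlen,
          List.getElem?_append_right le_rfl]
      simp
    have hins :PySem.List.insert (dup pre ++ x :: xs) ((2 * pre.length : Nat) : Int) x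
        = dup (pre ++ [x]) ++ xs := by
      rw [PySem.List.insert_natCast _ _ _ (by simp [hlen]), ← hlen,
          List.take_left, List.drop_left]
      simp [dup]
    have h2 : 2 * pre.length + 2 = 2 * (pre ++ [x]).length := by simp; ring
    rw [hget, hins, h2, ih (pre ++ [x]), dup_append]
    simp [dup]

theorem stutterB_eq_dup (a : List Int) : stutter_alt a = dup a := by
  have h := stutterB_go a []
  simpa [dup] using h

-- ===== VERDICT (by name: the statement is the Claim_ definition above) =====
theorem stutter_spec : Claim_equal_stutter := by
  intro a _
  unfold Spec_stutter
  rw [stutterA_eq_dup, stutterB_eq_dup]
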